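-- pv_equiv track=rewrite | github.com/KhangBBBB/krn-kodelist-in-python | src/krun/krun.py | parseToken
-- ===== SOURCE A (Python) =====
-- def parseToken(tokenList):
--     """
--     Process the list of tokens further
--     """
--
--     parseList1 = []
--     f1 = False
--     i = 0
--
--     if len(tokenList) > 2:
--        if tokenList[0] == '.' and tokenList[1] == '\\' and tokenList[2] == '\"':
--            return ['.']
--
--     for s in tokenList:
--         i += 1
--         if f1 and s != '"':
--             parseList1[len(parseList1) - 1] += s
--             continue
--         if f1 and s == '"':
--             f1 = False
--             continue
--         if s == '"':
--             parseList1.append("")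
--             f1 = True
--             continue
--         parseList1.append(s)
--     if f1 == True:
--         return None
--
--     parseList2 = []
--     i = 0
--     f1 = False
--
--     for s in parseList1:
--         i += 1
--         if f1:
--             parseList2[len(parseList2) - 1] += s
--             f1 = False
--             continue
--         if i > 1 and s == '.':
--             parseList2[len(parseList2) - 1] += s
--             f1 = True
--             continue
--         parseList2.append(s)
--     parseList = parseList2
--
--     return parseList
-- ===== SOURCE B (Python) =====
-- def _emit(res, s, pending):
--     if pending:
--         res[-1] += s
--         return False
--     if res and s == '.':
--         res[-1] += '.'
--         return True
--     res.append(s)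
--     return False
--
-- def parseToken(tokenList):
--     if len(tokenList) > 2 and tokenList[0] == '.' and tokenList[1] == '\\' and tokenList[2] == '"':
--         return ['.']
--     res = []
--     buf = None       # current quoted entry being built, or None when outside quotes
--     pending = False  # last emitted entry ends with a joining '.'
--     for s in tokenList:
--         if buf is not None:
--             if s == '"':
--                 entry, buf = buf, None
--                 pending = _emit(res, entry, pending)
--             else:
--                 buf += s
--         elif s == '"':
--             buf = ""
--         else:
--             pending = _emit(res, s, pending)
--     if buf is not None:
--         return None
--     return res
-- ===== Notes on version B (the rewrite author's own statement) =====
-- stated objective: simpler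
-- what changed: Replaced A's two sequential passes (quote-merging into an intermediate list, then a second dot-joining scan with an index counter) by one fused single pass that keeps the quote buffer separate and routes every completed entry through an inline emit step with a dot-pending flag.
import Mathlib
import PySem

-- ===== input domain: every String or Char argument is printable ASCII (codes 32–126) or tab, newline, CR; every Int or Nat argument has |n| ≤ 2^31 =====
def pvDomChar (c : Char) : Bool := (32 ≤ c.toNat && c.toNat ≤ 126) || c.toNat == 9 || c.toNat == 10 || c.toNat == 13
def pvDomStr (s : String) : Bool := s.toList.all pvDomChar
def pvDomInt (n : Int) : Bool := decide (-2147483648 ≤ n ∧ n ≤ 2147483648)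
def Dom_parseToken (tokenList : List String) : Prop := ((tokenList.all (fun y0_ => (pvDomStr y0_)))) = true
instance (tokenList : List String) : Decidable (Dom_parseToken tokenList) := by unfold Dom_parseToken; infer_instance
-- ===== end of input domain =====

-- B fuses A's two passes (quote-merging, then dot-joining) into one single pass; objective: simpler.


-- ===== PORT A =====
-- parseList1[len(parseList1)-1] += s  (only ever reached with a nonempty list in A; [] case is unreachable)
def appendLast (xs : List String) (s : String) : List String :=
  match xs with
  | [] => []
  | [x] => [x ++ s]
  | x :: rest => x :: appendLast rest s

-- A's first loop: state (parseList1, f1)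
def pass1A : List String → List String → Bool → (List String × Bool)
  | [], acc, f1 => (acc, f1)
  | s :: rest, acc, f1 =>
    if f1 = true ∧ s ≠ "\"" then pass1A rest (appendLast acc s) f1
    else if f1 = true ∧ s = "\"" then pass1A rest acc false
    else if s = "\"" then pass1A rest (acc ++ [""]) true
    else pass1A rest (acc ++ [s]) f1

-- A's second loop: state (parseList2, f1, i)
def pass2A : List String → List String → Bool → Nat → List String
  | [], acc, _, _ => acc
  | s :: rest, acc, f1, i =>
    if f1 = true then pass2A rest (appendLast acc s) false (i + 1)
    else if i + 1 > 1 ∧ s = "." then pass2A rest (appendLast acc ".") true (i + 1)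
    else pass2A rest (acc ++ [s]) f1 (i + 1)

def parseToken (tokenList : List String) : Option (List String) :=
  if tokenList.length > 2 ∧ tokenList.getD 0 "" = "." ∧ tokenList.getD 1 "" = "\\" ∧ tokenList.getD 2 "" = "\"" then
    some ["."]
  else
    match pass1A tokenList [] false with
    | (_, true) => none
    | (parseList1, false) => some (pass2A parseList1 [] false 0)

-- ===== PORT B =====
-- Source B's _emit: route one completed entry through the dot-joining logic
def emitB (res : List String) (s : String) (pending : Bool) : List String × Bool :=
  if pending = true then (appendLast res s, false)
  else if res ≠ [] ∧ s = "." then (appendLast res ".", true)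
  else (res ++ [s], false)

-- one step of Source B's single loop; state (res, buf, pending)
def stepB (st : List String × Option String × Bool) (s : String) : List String × Option String × Bool :=
  match st with
  | (res, some buf, pending) =>
    if s = "\"" then
      let (res', p') := emitB res buf pending
      (res', none, p')
    else (res, some (buf ++ s), pending)
  | (res, none, pending) =>
    if s = "\"" then (res, some "", pending)
    else
      let (res', p') := emitB res s pending
      (res', none, p')

def parseToken_alt (tokenList : List String) : Option (List String) :=
  if tokenList.length > 2 ∧ tokenList.getD 0 "" = "." ∧ tokenList.getD 1 "" = "\\" ∧ tokenList.getD 2 "" = "\"" then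
    some ["."]
  else
    match tokenList.foldl stepB ([], none, false) with
    | (_, some _, _) => none
    | (res, none, _) => some res

-- ===== PRECONDITION & SPEC =====
def Spec_parseToken (tokenList : List String) (out : Option (List String)) : Prop := out = parseToken_alt tokenList
instance (tokenList : List String) (out : Option (List String)) : Decidable (Spec_parseToken tokenList out) := by unfold Spec_parseToken; infer_instance

-- ===== CLAIM (what is proved, stated in full; the proofs are below) =====
def Claim_equal_parseToken : Prop := ∀ (tokenList : List String), Dom_parseToken tokenList → Spec_parseToken tokenList (parseToken tokenList)

-- ===== LEMMAS AND PROOFS =====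

-- Reference shape of pass 1: entries produced, split by quote state (proof-side only).
mutual
def q0 : List String → (List String × Bool)
  | [] => ([], false)
  | s :: rest =>
    if s = "\"" then qIn rest ""
    else ((s :: (q0 rest).1, (q0 rest).2))

def qIn : List String → String → (List String × Bool)
  | [], buf => ([buf], true)
  | s :: rest, buf =>
    if s = "\"" then (buf :: (q0 rest).1, (q0 rest).2)
    else qIn rest (buf ++ s)
end

-- pass 2 with full state, first-position test by emptiness (proof-side only)
def pass2S : List String → List String → Bool → (List String × Bool)
  | [], acc, p => (acc, p)
  | s :: rest, acc, p => pass2S rest (emitB acc s p).1 (emitB acc s p).2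

theorem appendLast_append (acc : List String) (b s : String) :
    appendLast (acc ++ [b]) s = acc ++ [b ++ s] := by
  induction acc with
  | nil => simp [appendLast]
  | cons x xs ih =>
    cases xs with
    | nil => simp [appendLast]
    | cons y ys => simpa [appendLast] using ih

theorem appendLast_ne_nil (acc : List String) (s : String) (h : acc ≠ []) :
    appendLast acc s ≠ [] := by
  cases acc with
  | nil => exact absurd rfl h
  | cons x xs => cases xs <;> simp [appendLast]

-- branch equations for the ports' step functions
theorem pass1A_t_nq (s : String) (rest acc : List String) (h : ¬ s = "\"") :
    pass1A (s :: rest) acc true = pass1A rest (appendLast acc s) true := by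
  simp [pass1A, h]

theorem pass1A_t_q (rest acc : List String) :
    pass1A ("\"" :: rest) acc true = pass1A rest acc false := by
  simp [pass1A]

theorem pass1A_f_q (rest acc : List String) :
    pass1A ("\"" :: rest) acc false = pass1A rest (acc ++ [""]) true := by
  simp [pass1A]

theorem pass1A_f_nq (s : String) (rest acc : List String) (h : ¬ s = "\"") :
    pass1A (s :: rest) acc false = pass1A rest (acc ++ [s]) false := by
  simp [pass1A, h]

theorem pass2A_t (s : String) (rest acc : List String) (i : Nat) :
    pass2A (s :: rest) acc true i = pass2A rest (appendLast acc s) false (i + 1) := by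
  simp [pass2A]

theorem pass2A_f_dot (rest acc : List String) (i : Nat) (h : i + 1 > 1) :
    pass2A ("." :: rest) acc false i = pass2A rest (appendLast acc ".") true (i + 1) := by
  simp [pass2A, h]

theorem pass2A_f_other (s : String) (rest acc : List String) (i : Nat)
    (h : ¬ (i + 1 > 1 ∧ s = ".")) :
    pass2A (s :: rest) acc false i = pass2A rest (acc ++ [s]) false (i + 1) := by
  simp only [pass2A]
  split_ifs with h1 h2 <;> simp_all

theorem emitB_t (res : List String) (s : String) :
    emitB res s true = (appendLast res s, false) := by
  simp [emitB]

theorem emitB_f_dot (res : List String) (h : res ≠ []) :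
    emitB res "." false = (appendLast res ".", true) := by
  simp [emitB, h]

theorem emitB_f_other (res : List String) (s : String) (h : ¬ (res ≠ [] ∧ s = ".")) :
    emitB res s false = (res ++ [s], false) := by
  simp [emitB, h]

mutual
theorem pass1A_q0 : ∀ (ts : List String) (acc : List String),
    pass1A ts acc false = (acc ++ (q0 ts).1, (q0 ts).2)
  | [], acc => by simp [pass1A, q0]
  | s :: rest, acc => by
    by_cases hq : s = "\""
    · subst hq
      rw [pass1A_f_q, q0]
      simpa using pass1A_qIn rest acc ""
    · rw [pass1A_f_nq s rest acc hq, pass1A_q0 rest (acc ++ [s])]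
      simp [q0, hq]

theorem pass1A_qIn : ∀ (ts : List String) (acc : List String) (buf : String),
    pass1A ts (acc ++ [buf]) true = (acc ++ (qIn ts buf).1, (qIn ts buf).2)
  | [], acc, buf => by simp [pass1A, qIn]
  | s :: rest, acc, buf => by
    by_cases hq : s = "\""
    · subst hq
      rw [pass1A_t_q, pass1A_q0 rest (acc ++ [buf])]
      simp [qIn]
    · rw [pass1A_t_nq s rest (acc ++ [buf]) hq, appendLast_append,
        pass1A_qIn rest acc (buf ++ s)]
      simp [qIn, hq]
end

-- A's pass 2 (with the index counter) equals pass2S once i tracks emptiness of acc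
theorem pass2A_pass2S : ∀ (l acc : List String) (f1 : Bool) (i : Nat),
    (acc = [] ↔ i = 0) → (f1 = true → acc ≠ []) →
    pass2A l acc f1 i = (pass2S l acc f1).1
  | [], acc, f1, i, _, _ => by simp [pass2A, pass2S]
  | s :: rest, acc, f1, i, hiff, hf1 => by
    cases f1 with
    | true =>
      have hne : acc ≠ [] := hf1 rfl
      rw [pass2A_t, pass2S, emitB_t]
      exact pass2A_pass2S rest (appendLast acc s) false (i + 1)
        (iff_of_false (appendLast_ne_nil acc s hne) (by omega)) (by simp)
    | false =>
      by_cases hc : acc ≠ [] ∧ s = "."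
      · have hi : ¬ i = 0 := fun h => hc.1 (hiff.mpr h)
        obtain ⟨hcl, hcr⟩ := hc
        subst hcr
        rw [pass2A_f_dot rest acc i (by omega), pass2S, emitB_f_dot acc hcl]
        exact pass2A_pass2S rest (appendLast acc ".") true (i + 1)
          (iff_of_false (appendLast_ne_nil acc "." hcl) (by omega))
          (fun _ => appendLast_ne_nil acc "." hcl)
      · have hcc : ¬ (i + 1 > 1 ∧ s = ".") := by
          intro h
          apply hc
          refine ⟨fun hnil => ?_, h.2⟩
          have : i = 0 := hiff.mp hnil
          omega
        rw [pass2A_f_other s rest acc i hcc, pass2S, emitB_f_other acc s hc]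
        exact pass2A_pass2S rest (acc ++ [s]) false (i + 1) (by simp) (by simp)

-- how B's loop finishes
def finishB (st : List String × Option String × Bool) : Option (List String) :=
  match st with
  | (_, some _, _) => none
  | (res, none, _) => some res

theorem stepB_none_q (res : List String) (p : Bool) :
    stepB (res, none, p) "\"" = (res, some "", p) := by
  simp [stepB]

theorem stepB_none_nq (res : List String) (p : Bool) (s : String) (h : ¬ s = "\"") :
    stepB (res, none, p) s = ((emitB res s p).1, none, (emitB res s p).2) := by
  simp [stepB, h]

theorem stepB_some_q (res : List String) (buf : String) (p : Bool) :
    stepB (res, some buf, p) "\"" = ((emitB res buf p).1, none, (emitB res buf p).2) := by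
  simp [stepB]

theorem stepB_some_nq (res : List String) (buf : String) (p : Bool) (s : String)
    (h : ¬ s = "\"") : stepB (res, some buf, p) s = (res, some (buf ++ s), p) := by
  simp [stepB, h]

-- the fusion: B's single fold computes q0 composed with pass2S
mutual
theorem foldB_q0 : ∀ (ts res : List String) (p : Bool),
    finishB (ts.foldl stepB (res, none, p)) =
      (if (q0 ts).2 = true then none else some (pass2S (q0 ts).1 res p).1)
  | [], res, p => by simp [finishB, q0, pass2S]
  | s :: rest, res, p => by
    by_cases hq : s = "\""
    · subst hq
      rw [List.foldl_cons, stepB_none_q, q0]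
      simpa using foldB_qIn rest res "" p
    · rw [List.foldl_cons, stepB_none_nq res p s hq,
        foldB_q0 rest (emitB res s p).1 (emitB res s p).2]
      simp [q0, hq, pass2S]

theorem foldB_qIn : ∀ (ts res : List String) (buf : String) (p : Bool),
    finishB (ts.foldl stepB (res, some buf, p)) =
      (if (qIn ts buf).2 = true then none else some (pass2S (qIn ts buf).1 res p).1)
  | [], res, buf, p => by simp [finishB, qIn]
  | s :: rest, res, buf, p => by
    by_cases hq : s = "\""
    · subst hq
      rw [List.foldl_cons, stepB_some_q,
        foldB_q0 rest (emitB res buf p).1 (emitB res buf p).2]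
      simp [qIn, pass2S]
    · rw [List.foldl_cons, stepB_some_nq res buf p s hq]
      rw [foldB_qIn rest res (buf ++ s) p]
      simp [qIn, hq]
end

-- ===== VERDICT (by name: the statement is the Claim_ definition above) =====
theorem parseToken_spec : Claim_equal_parseToken := by
  intro ts _
  unfold Spec_parseToken parseToken parseToken_alt
  by_cases hg : ts.length > 2 ∧ ts.getD 0 "" = "." ∧ ts.getD 1 "" = "\\" ∧ ts.getD 2 "" = "\""
  · rw [if_pos hg, if_pos hg]
  · rw [if_neg hg, if_neg hg]
    have hA := pass1A_q0 ts []
    have hB := foldB_q0 ts [] false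
    cases h : q0 ts with
    | mk es f =>
      simp only [h] at hA hB
      simp only [hA]
      cases hf : ts.foldl stepB ([], none, false) with
      | mk r rest2 =>
        obtain ⟨ob, pb⟩ := rest2
        rw [hf] at hB
        cases f with
        | true =>
          rw [if_pos rfl] at hB
          cases ob with
          | some b => rfl
          | none => simp [finishB] at hB
        | false =>
          have h2 := pass2A_pass2S es [] false 0 (by simp) (by simp)
          rw [if_neg Bool.false_ne_true] at hB
          cases ob with
          | some b => simp [finishB] at hB
          | none =>
            simp [finishB] at hB
            simp [h2, hB]
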